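-- pv_equiv track=rewrite | github.com/guidimarco/autonode | src/autonode/infrastructure/tools/search_tool.py | _group_hits
-- ===== SOURCE A (Python) =====
-- def _group_hits(lines: list[str], queries: list[str]) -> dict[str, list[str]]:
--     grouped: dict[str, list[str]] = {q: [] for q in queries}
--     seen: set[tuple[str, str]] = set()
--     for line in lines:
--         for q in queries:
--             if q in line:
--                 key = (q, line)
--                 if key in seen:
--                     continue
--                 grouped[q].append(line)
--                 seen.add(key)
--     return grouped
-- ===== SOURCE B (Python) =====
-- def _group_hits(lines: list[str], queries: list[str]) -> dict[str, list[str]]: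
--     # Multi-pattern position scan: hash-set of queries keyed by distinct lengths;
--     # each (deduped) line is scanned once, slices looked up in the set.
--     qset = set(queries)
--     lengths = sorted({len(q) for q in queries})
--     grouped: dict[str, list[str]] = {q: [] for q in queries}
--     for line in dict.fromkeys(lines):
--         n = len(line)
--         found: set[str] = set()
--         for i in range(n + 1):
--             for L in lengths:
--                 if i + L > n:
--                     break
--                 sub = line[i:i + L]
--                 if sub in qset and sub not in found:
--                     found.add(sub)
--                     grouped[sub].append(line)
--     return grouped
-- ===== Notes on version B (the rewrite author's own statement) =====
-- stated objective: faster
-- what changed: The per-query substring scan ('for q in queries: if q in line') with a global (query,line) seen-set is replaced by a multi-pattern position scan: queries go into a hash set with their sorted distinct lengths, lines are deduped once up front, and each line is scanned position by position, slicing one window per query length and looking it up in the set.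
import Mathlib
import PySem

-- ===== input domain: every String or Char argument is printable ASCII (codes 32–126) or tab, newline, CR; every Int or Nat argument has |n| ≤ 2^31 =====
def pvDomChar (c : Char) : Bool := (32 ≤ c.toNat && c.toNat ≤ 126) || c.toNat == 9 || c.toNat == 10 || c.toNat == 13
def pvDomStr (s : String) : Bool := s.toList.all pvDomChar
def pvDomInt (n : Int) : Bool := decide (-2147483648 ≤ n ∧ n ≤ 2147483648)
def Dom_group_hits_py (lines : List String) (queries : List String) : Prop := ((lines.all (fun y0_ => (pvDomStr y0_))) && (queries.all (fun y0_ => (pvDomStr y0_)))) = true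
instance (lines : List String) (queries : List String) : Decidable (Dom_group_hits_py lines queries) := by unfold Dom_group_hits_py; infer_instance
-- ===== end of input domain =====

-- B replaces A's per-query substring scan by a multi-pattern position scan: a hash set of the
-- queries keyed by their sorted distinct lengths, lines deduped once up front, each line scanned
-- position by position with set lookups of the sliced windows (alternative algorithm, same result).

-- ===== PORT A =====
-- body of A's inner 'for q in queries' loop, acting on the state (grouped, seen)
def ghStep (line : String) (st : PySem.Dict String (List String) × PySem.Set (String × String))
    (q : String) : PySem.Dict String (List String) × PySem.Set (String × String) :=
  if PySem.Str.isIn q line then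
    if st.2.contains (q, line) then st
    else (st.1.modify q [] (· ++ [line]), PySem.Set.add st.2 (q, line))
  else st

def group_hits_py (lines : List String) (queries : List String) : List (String × List String) :=
  let grouped : PySem.Dict String (List String) :=
    queries.foldl (fun d q => d.insert q []) PySem.Dict.empty
  let final :=
    lines.foldl (fun st line => queries.foldl (ghStep line) st) (grouped, PySem.Set.empty)
  final.1.items

-- ===== PORT B =====
-- body of B's 'if sub in qset and sub not in found' step, acting on the state (grouped, found)
def ghbStep (line : String) (qset : PySem.Set String)
    (st : PySem.Dict String (List String) × PySem.Set String) (sub : String) :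
    PySem.Dict String (List String) × PySem.Set String :=
  if qset.contains sub && !st.2.contains sub then
    (st.1.modify sub [] (· ++ [line]), PySem.Set.add st.2 sub)
  else st

-- B's inner 'for L in lengths: if i + L > n: break; …' loop
def ghbLens (line : String) (qset : PySem.Set String) (n i : Int) :
    List Int → PySem.Dict String (List String) × PySem.Set String →
    PySem.Dict String (List String) × PySem.Set String
  | [], st => st
  | L :: rest, st =>
    if n < i + L then st
    else ghbLens line qset n i rest
      (ghbStep line qset st (PySem.Str.slice line (some i) (some (i + L))))

-- B's per-line body: fresh 'found' set, scan of positions 0..n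
def ghbLine (qset : PySem.Set String) (lengths : List Int)
    (d : PySem.Dict String (List String)) (line : String) : PySem.Dict String (List String) :=
  let n := PySem.Str.len line
  ((PySem.List.pyRange 0 (n + 1) 1).foldl
    (fun st i => ghbLens line qset n i lengths st) (d, PySem.Set.empty)).1

def group_hits_py_alt (lines : List String) (queries : List String) : List (String × List String) :=
  let qset := PySem.Set.ofList queries
  let lengths :=
    PySem.List.sorted (PySem.Set.ofList (queries.map (fun q => PySem.Str.len q))) (fun L => L)
  let grouped : PySem.Dict String (List String) :=
    queries.foldl (fun d q => d.insert q []) PySem.Dict.empty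
  ((PySem.List.dedup lines).foldl (ghbLine qset lengths) grouped).items

-- ===== PRECONDITION & SPEC =====
def Spec_group_hits_py (lines : List String) (queries : List String) (out : List (String × List String)) : Prop := out = group_hits_py_alt lines queries
instance (lines : List String) (queries : List String) (out : List (String × List String)) : Decidable (Spec_group_hits_py lines queries out) := by unfold Spec_group_hits_py; infer_instance

-- ===== CLAIM (what is proved, stated in full; the proofs are below) =====
def Claim_equal_group_hits_py : Prop := ∀ (lines : List String) (queries : List String), Dom_group_hits_py lines queries → Spec_group_hits_py lines queries (group_hits_py lines queries)

-- ===== LEMMAS AND PROOFS =====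

-- the common canonical form both ports are reduced to
def ghCanon (lines : List String) (queries : List String) : List (String × List String) :=
  (PySem.List.dedup queries).map
    (fun q => (q, (PySem.List.dedup lines).filter (fun line => PySem.Str.isIn q line)))

theorem gh_dedup_append (xs : List String) (x : String) :
    PySem.List.dedup (xs ++ [x]) =
      if x ∈ xs then PySem.List.dedup xs else PySem.List.dedup xs ++ [x] := by
  simp only [PySem.List.dedup_eq_ofList, PySem.Set.ofList_eq_foldl, List.foldl_append,
    List.foldl_cons, List.foldl_nil]
  rw [show List.foldl PySem.Set.add [] xs = PySem.Set.ofList xs from (PySem.Set.ofList_eq_foldl xs).symm]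
  unfold PySem.Set.add
  rw [PySem.Set.contains_eq_decide]
  by_cases h : x ∈ xs
  · simp [h, (PySem.Set.mem_ofList xs x).mpr h]
  · have : x ∉ PySem.Set.ofList xs := fun hx => h ((PySem.Set.mem_ofList xs x).mp hx)
    simp [h, this]

theorem gh_dedup_filter (p : String → Bool) (l : List String) :
    PySem.List.dedup (l.filter p) = (PySem.List.dedup l).filter p := by
  induction l using List.reverseRecOn with
  | nil => rfl
  | append_singleton l x ih =>
    rw [List.filter_append, gh_dedup_append]
    by_cases hp : p x = true
    · have hfx : List.filter p [x] = [x] := by simp [hp]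
      rw [hfx, gh_dedup_append]
      by_cases hx : x ∈ l
      · rw [if_pos hx, if_pos (List.mem_filter.mpr ⟨hx, hp⟩), ih]
      · rw [if_neg hx, if_neg (fun h => hx (List.mem_filter.mp h).1), List.filter_append, ih, hfx]
    · have hfx : List.filter p [x] = [] := by simp [hp]
      rw [hfx, List.append_nil]
      by_cases hx : x ∈ l
      · rw [if_pos hx, ih]
      · rw [if_neg hx, List.filter_append, ih, hfx, List.append_nil]

theorem gh_inner (line : String) (qs : List String) (d : PySem.Dict String (List String))
    (s : PySem.Set (String × String)) (hk : ∀ q ∈ qs, d.contains q = true) :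
    (qs.foldl (ghStep line) (d, s)).1.keys = d.keys ∧
    (∀ k, (qs.foldl (ghStep line) (d, s)).1.getD k [] =
      if k ∈ qs ∧ PySem.Str.isIn k line = true ∧ (k, line) ∉ s
      then d.getD k [] ++ [line] else d.getD k []) ∧
    (∀ p : String × String, p ∈ (qs.foldl (ghStep line) (d, s)).2 ↔
      p ∈ s ∨ (p.1 ∈ qs ∧ PySem.Str.isIn p.1 line = true ∧ p.2 = line)) := by
  induction qs generalizing d s with
  | nil => simp
  | cons q qs ih =>
    simp only [List.foldl_cons]
    by_cases hin : PySem.Str.isIn q line = true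
    · by_cases hs : (q, line) ∈ s
      · have hstep : ghStep line (d, s) q = (d, s) := by
          unfold ghStep
          rw [if_pos hin, PySem.Set.contains_eq_decide]
          simp [hs]
        rw [hstep]
        obtain ⟨k1, k2, k3⟩ := ih d s (fun q hq => hk q (List.mem_cons_of_mem _ hq))
        refine ⟨k1, fun k => ?_, fun p => ?_⟩
        · rw [k2 k]
          by_cases hkq : k = q
          · subst hkq; simp [hs]
          · simp [hkq]
        · rw [k3 p]
          constructor
          · rintro (h | ⟨h1, h2, h3⟩)
            · left; exact h
            · exact Or.inr ⟨List.mem_cons_of_mem _ h1, h2, h3⟩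
          · rintro (h | ⟨h1, h2, h3⟩)
            · left; exact h
            · rcases List.mem_cons.mp h1 with h1 | h1
              · subst h1; subst h3; left; exact hs
              · right; exact ⟨h1, h2, h3⟩
      · have hstep : ghStep line (d, s) q
            = (d.modify q [] (· ++ [line]), PySem.Set.add s (q, line)) := by
          unfold ghStep
          rw [if_pos hin, PySem.Set.contains_eq_decide]
          simp [hs]
        rw [hstep]
        have hk' : ∀ q' ∈ qs, (d.modify q [] (· ++ [line])).contains q' = true := by
          intro q' hq'
          rw [PySem.Dict.contains_modify]
          simp [hk q' (List.mem_cons_of_mem _ hq')]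
        obtain ⟨k1, k2, k3⟩ := ih _ _ hk'
        have hkeys : (d.modify q [] (· ++ [line])).keys = d.keys := by
          rw [PySem.Dict.keys_modify,
            PySem.Dict.keys_insert_of_contains d _ (hk q (List.mem_cons_self))]
        refine ⟨by rw [k1, hkeys], fun k => ?_, fun p => ?_⟩
        · rw [k2 k]
          by_cases hkq : k = q
          · subst hkq
            have hmem : (k, line) ∈ PySem.Set.add s (k, line) := by
              rw [PySem.Set.mem_add]; right; rfl
            rw [if_neg (by intro h; exact h.2.2 hmem)]
            rw [PySem.Dict.getD_modify]
            rw [if_pos rfl, if_pos ⟨List.mem_cons_self, hin, hs⟩]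
          · have hgd : (d.modify q [] (· ++ [line])).getD k [] = d.getD k [] := by
              rw [PySem.Dict.getD_modify]; simp [hkq]
            have hmem : ((k, line) ∈ PySem.Set.add s (q, line)) ↔ (k, line) ∈ s := by
              rw [PySem.Set.mem_add]
              constructor
              · rintro (h | h)
                · exact h
                · exact absurd (congrArg Prod.fst h) hkq
              · exact Or.inl
            rw [hgd]
            by_cases hc : k ∈ qs ∧ PySem.Str.isIn k line = true ∧ (k, line) ∉ s
            · rw [if_pos ⟨hc.1, hc.2.1, hmem.not.mpr hc.2.2⟩,
                if_pos ⟨List.mem_cons_of_mem _ hc.1, hc.2.1, hc.2.2⟩]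
            · rw [if_neg, if_neg]
              · intro ⟨h1, h2, h3⟩
                exact hc ⟨(List.mem_cons.mp h1).resolve_left hkq, h2, h3⟩
              · intro ⟨h1, h2, h3⟩
                exact hc ⟨h1, h2, fun hx => h3 (hmem.mpr hx)⟩
        · rw [k3 p, PySem.Set.mem_add]
          constructor
          · rintro ((h | h) | ⟨h1, h2, h3⟩)
            · left; exact h
            · right
              refine ⟨by rw [h]; exact List.mem_cons_self, by rw [h]; exact hin, by rw [h]⟩
            · exact Or.inr ⟨List.mem_cons_of_mem _ h1, h2, h3⟩
          · rintro (h | ⟨h1, h2, h3⟩)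
            · left; left; exact h
            · rcases List.mem_cons.mp h1 with h1 | h1
              · left; right; exact Prod.ext h1 h3
              · right; exact ⟨h1, h2, h3⟩
    · have hstep : ghStep line (d, s) q = (d, s) := by
        unfold ghStep; rw [if_neg hin]
      rw [hstep]
      obtain ⟨k1, k2, k3⟩ := ih d s (fun q hq => hk q (List.mem_cons_of_mem _ hq))
      refine ⟨k1, fun k => ?_, fun p => ?_⟩
      · rw [k2 k]
        by_cases hkq : k = q
        · subst hkq
          rw [if_neg (fun h => hin h.2.1), if_neg (fun h => hin h.2.1)]
        · by_cases hc : k ∈ qs ∧ PySem.Str.isIn k line = true ∧ (k, line) ∉ s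
          · rw [if_pos hc, if_pos ⟨List.mem_cons_of_mem _ hc.1, hc.2.1, hc.2.2⟩]
          · rw [if_neg hc, if_neg
              (fun h => hc ⟨(List.mem_cons.mp h.1).resolve_left hkq, h.2.1, h.2.2⟩)]
      · rw [k3 p]
        constructor
        · rintro (h | ⟨h1, h2, h3⟩)
          · left; exact h
          · exact Or.inr ⟨List.mem_cons_of_mem _ h1, h2, h3⟩
        · rintro (h | ⟨h1, h2, h3⟩)
          · left; exact h
          · rcases List.mem_cons.mp h1 with h1 | h1
            · subst h1; subst h3; exact absurd h2 hin
            · right; exact ⟨h1, h2, h3⟩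

theorem gh_outer (queries : List String) (ls done : List String)
    (d : PySem.Dict String (List String)) (s : PySem.Set (String × String))
    (hkeys : d.keys = PySem.List.dedup queries)
    (hval : ∀ k, d.getD k [] =
      if k ∈ queries then PySem.List.dedup (done.filter (fun l => PySem.Str.isIn k l)) else [])
    (hseen : ∀ p : String × String,
      p ∈ s ↔ p.1 ∈ queries ∧ PySem.Str.isIn p.1 p.2 = true ∧ p.2 ∈ done) :
    (ls.foldl (fun st line => queries.foldl (ghStep line) st) (d, s)).1.keys
      = PySem.List.dedup queries ∧
    (∀ k, (ls.foldl (fun st line => queries.foldl (ghStep line) st) (d, s)).1.getD k [] =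
      if k ∈ queries
      then PySem.List.dedup ((done ++ ls).filter (fun l => PySem.Str.isIn k l)) else []) := by
  induction ls generalizing done d s with
  | nil => exact ⟨hkeys, by simpa using hval⟩
  | cons line ls ih =>
    simp only [List.foldl_cons]
    have hk : ∀ q ∈ queries, d.contains q = true := by
      intro q hq
      rw [PySem.Dict.contains_iff_mem_keys, hkeys, PySem.List.mem_dedup]
      exact hq
    obtain ⟨k1, k2, k3⟩ := gh_inner line queries d s hk
    have hval' : ∀ k, (queries.foldl (ghStep line) (d, s)).1.getD k [] =
        if k ∈ queries
        then PySem.List.dedup ((done ++ [line]).filter (fun l => PySem.Str.isIn k l)) else [] := by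
      intro k
      rw [k2 k, hval k]
      by_cases hq : k ∈ queries
      · simp only [if_pos hq]
        rw [List.filter_append, List.filter_cons, List.filter_nil]
        by_cases hin : PySem.Str.isIn k line = true
        · rw [if_pos hin, gh_dedup_append]
          by_cases hd : line ∈ done.filter (fun l => PySem.Str.isIn k l)
          · rw [if_pos hd]
            have : (k, line) ∈ s := (hseen (k, line)).mpr
              ⟨hq, hin, (List.mem_filter.mp hd).1⟩
            rw [if_neg (fun h => h.2.2 this)]
          · rw [if_neg hd]
            have : (k, line) ∉ s := fun h =>
              hd (List.mem_filter.mpr ⟨((hseen (k, line)).mp h).2.2, hin⟩)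
            rw [if_pos ⟨hq, hin, this⟩]
        · rw [if_neg hin, List.append_nil, if_neg (fun h => hin h.2.1)]
      · simp only [if_neg hq]
        rw [if_neg (fun h => hq h.1)]
    have hseen' : ∀ p : String × String, p ∈ (queries.foldl (ghStep line) (d, s)).2 ↔
        p.1 ∈ queries ∧ PySem.Str.isIn p.1 p.2 = true ∧ p.2 ∈ done ++ [line] := by
      intro p
      rw [k3 p, hseen p]
      constructor
      · rintro (⟨h1, h2, h3⟩ | ⟨h1, h2, h3⟩)
        · exact ⟨h1, h2, by simp [h3]⟩
        · exact ⟨h1, by rw [h3]; exact h2, by simp [h3]⟩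
      · rintro ⟨h1, h2, h3⟩
        rcases List.mem_append.mp h3 with h3 | h3
        · left; exact ⟨h1, h2, h3⟩
        · right
          have : p.2 = line := by simpa using h3
          exact ⟨h1, by rw [← this]; exact h2, this⟩
    obtain ⟨r1, r2⟩ := ih (done ++ [line]) _ _ (k1.trans hkeys) hval' hseen'
    refine ⟨r1, fun k => ?_⟩
    rw [r2 k, List.append_assoc, List.singleton_append]

theorem gh_init_getD (l : List String) (d : PySem.Dict String (List String))
    (h : ∀ k, d.getD k [] = []) :
    ∀ k, (l.foldl (fun d q => d.insert q ([] : List String)) d).getD k [] = [] := by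
  induction l generalizing d with
  | nil => exact h
  | cons q l ih =>
    simp only [List.foldl_cons]
    refine ih _ (fun k => ?_)
    rw [PySem.Dict.getD_insert]
    split_ifs with hk
    · rfl
    · exact h k

theorem gh_a_main (lines queries : List String) :
    group_hits_py lines queries = ghCanon lines queries := by
  unfold group_hits_py ghCanon
  set d0 : PySem.Dict String (List String) :=
    queries.foldl (fun d q => d.insert q []) PySem.Dict.empty with hd0
  have hkeys0 : d0.keys = PySem.List.dedup queries := by
    rw [hd0, PySem.Dict.keys_foldl_insert queries (fun _ _ => []) PySem.Dict.empty]
    rw [PySem.List.dedup_eq_ofList, PySem.Set.ofList_eq_foldl]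
    rfl
  have hval0 : ∀ k, d0.getD k [] =
      if k ∈ queries then PySem.List.dedup (List.filter (fun l => PySem.Str.isIn k l) []) else [] := by
    intro k
    rw [gh_init_getD queries PySem.Dict.empty (fun k => PySem.Dict.getD_empty k []) k]
    simp
  have hseen0 : ∀ p : String × String,
      p ∈ (PySem.Set.empty : PySem.Set (String × String)) ↔
        p.1 ∈ queries ∧ PySem.Str.isIn p.1 p.2 = true ∧ p.2 ∈ ([] : List String) := by
    simp [PySem.Set.empty]
  obtain ⟨r1, r2⟩ := gh_outer queries lines [] d0 PySem.Set.empty hkeys0 hval0 hseen0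
  rw [PySem.Dict.items_eq_map_keys _ (r1 ▸ PySem.List.nodup_dedup queries) []]
  rw [r1]
  refine List.map_congr_left (fun k hk => ?_)
  rw [r2 k, if_pos ((PySem.List.mem_dedup queries k).mp hk)]
  rw [List.nil_append, gh_dedup_filter]

-- ===== B-side lemmas =====

theorem ghb_foldl_flatMap {α β σ : Type} (f : σ → β → σ) (g : α → List β)
    (l : List α) (init : σ) :
    l.foldl (fun st a => (g a).foldl f st) init = (l.flatMap g).foldl f init := by
  induction l generalizing init with
  | nil => rfl
  | cons a l ih => simp [List.flatMap_cons, List.foldl_append, ih]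

theorem ghb_lens_eq (line : String) (qset : PySem.Set String) (n i : Int)
    (Ls : List Int) (st : PySem.Dict String (List String) × PySem.Set String)
    (hs : Ls.Pairwise (· ≤ ·)) :
    ghbLens line qset n i Ls st =
      ((Ls.filter (fun L => !decide (n < i + L))).map
        (fun L => PySem.Str.slice line (some i) (some (i + L)))).foldl
        (ghbStep line qset) st := by
  induction Ls generalizing st with
  | nil => rfl
  | cons L rest ih =>
    rw [List.pairwise_cons] at hs
    by_cases hb : n < i + L
    · have hfil : (L :: rest).filter (fun L => !decide (n < i + L)) = [] := by
        rw [List.filter_eq_nil_iff]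
        intro L' hL'
        rcases List.mem_cons.mp hL' with h | h
        · subst h; simp [hb]
        · have : n < i + L' := lt_of_lt_of_le hb (by have := hs.1 L' h; omega)
          simp [this]
      rw [hfil]
      simp [ghbLens, hb]
    · have hfil : (L :: rest).filter (fun L => !decide (n < i + L))
          = L :: rest.filter (fun L => !decide (n < i + L)) := by
        rw [List.filter_cons]
        simp [hb]
      rw [hfil, List.map_cons, List.foldl_cons]
      simp only [ghbLens, if_neg hb]
      exact ih _ hs.2

theorem ghb_fold (queries : List String) (line : String) (subs : List String)
    (d : PySem.Dict String (List String)) (f : PySem.Set String)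
    (hk : ∀ q ∈ queries, d.contains q = true) :
    (subs.foldl (ghbStep line (PySem.Set.ofList queries)) (d, f)).1.keys = d.keys ∧
    (∀ k, (subs.foldl (ghbStep line (PySem.Set.ofList queries)) (d, f)).1.getD k [] =
      if k ∈ queries ∧ k ∉ f ∧ k ∈ subs then d.getD k [] ++ [line] else d.getD k []) ∧
    (∀ x, x ∈ (subs.foldl (ghbStep line (PySem.Set.ofList queries)) (d, f)).2 ↔
      x ∈ f ∨ (x ∈ queries ∧ x ∈ subs)) := by
  induction subs generalizing d f with
  | nil => simp
  | cons sub rest ih =>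
    simp only [List.foldl_cons]
    by_cases hq : sub ∈ queries
    · by_cases hf : sub ∈ f
      · have hstep : ghbStep line (PySem.Set.ofList queries) (d, f) sub = (d, f) := by
          unfold ghbStep
          rw [PySem.Set.contains_eq_decide]
          simp [hf]
        rw [hstep]
        obtain ⟨k1, k2, k3⟩ := ih d f hk
        refine ⟨k1, fun k => ?_, fun x => ?_⟩
        · rw [k2 k]
          by_cases hks : k = sub
          · subst hks; simp [hf]
          · simp [hks]
        · rw [k3 x]
          constructor
          · rintro (h | ⟨h1, h2⟩)
            · left; exact h
            · exact Or.inr ⟨h1, List.mem_cons_of_mem _ h2⟩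
          · rintro (h | ⟨h1, h2⟩)
            · left; exact h
            · rcases List.mem_cons.mp h2 with h2 | h2
              · subst h2; left; exact hf
              · right; exact ⟨h1, h2⟩
      · have hstep : ghbStep line (PySem.Set.ofList queries) (d, f) sub
            = (d.modify sub [] (· ++ [line]), PySem.Set.add f sub) := by
          unfold ghbStep
          rw [PySem.Set.contains_eq_decide, PySem.Set.contains_eq_decide]
          simp [hf, (PySem.Set.mem_ofList queries sub).mpr hq]
        rw [hstep]
        have hk' : ∀ q ∈ queries, (d.modify sub [] (· ++ [line])).contains q = true := by
          intro q hqq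
          rw [PySem.Dict.contains_modify]
          simp [hk q hqq]
        obtain ⟨k1, k2, k3⟩ := ih _ _ hk'
        have hkeys : (d.modify sub [] (· ++ [line])).keys = d.keys := by
          rw [PySem.Dict.keys_modify, PySem.Dict.keys_insert_of_contains d _ (hk sub hq)]
        refine ⟨k1.trans hkeys, fun k => ?_, fun x => ?_⟩
        · rw [k2 k]
          by_cases hks : k = sub
          · subst hks
            have hmem : k ∈ PySem.Set.add f k := by rw [PySem.Set.mem_add]; right; rfl
            rw [if_neg (fun h => h.2.1 hmem), PySem.Dict.getD_modify, if_pos rfl,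
              if_pos ⟨hq, hf, List.mem_cons_self⟩]
          · have hgd : (d.modify sub [] (· ++ [line])).getD k [] = d.getD k [] := by
              rw [PySem.Dict.getD_modify]; simp [hks]
            have hmem : (k ∈ PySem.Set.add f sub) ↔ k ∈ f := by
              rw [PySem.Set.mem_add]
              exact ⟨fun h => h.resolve_right hks, Or.inl⟩
            rw [hgd]
            by_cases hc : k ∈ queries ∧ k ∉ f ∧ k ∈ rest
            · rw [if_pos ⟨hc.1, hmem.not.mpr hc.2.1, hc.2.2⟩,
                if_pos ⟨hc.1, hc.2.1, List.mem_cons_of_mem _ hc.2.2⟩]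
            · rw [if_neg, if_neg]
              · intro ⟨h1, h2, h3⟩
                exact hc ⟨h1, h2, (List.mem_cons.mp h3).resolve_left hks⟩
              · intro ⟨h1, h2, h3⟩
                exact hc ⟨h1, fun hx => h2 (hmem.mpr hx), h3⟩
        · rw [k3 x, PySem.Set.mem_add]
          constructor
          · rintro ((h | h) | ⟨h1, h2⟩)
            · left; exact h
            · subst h; exact Or.inr ⟨hq, List.mem_cons_self⟩
            · exact Or.inr ⟨h1, List.mem_cons_of_mem _ h2⟩
          · rintro (h | ⟨h1, h2⟩)
            · left; left; exact h
            · rcases List.mem_cons.mp h2 with h2 | h2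
              · subst h2; left; right; rfl
              · right; exact ⟨h1, h2⟩
    · have hstep : ghbStep line (PySem.Set.ofList queries) (d, f) sub = (d, f) := by
        unfold ghbStep
        rw [PySem.Set.contains_eq_decide]
        have : sub ∉ PySem.Set.ofList queries := fun h =>
          hq ((PySem.Set.mem_ofList queries sub).mp h)
        simp [this]
      rw [hstep]
      obtain ⟨k1, k2, k3⟩ := ih d f hk
      refine ⟨k1, fun k => ?_, fun x => ?_⟩
      · rw [k2 k]
        by_cases hks : k = sub
        · subst hks; simp [hq]
        · simp [hks]
      · rw [k3 x]
        constructor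
        · rintro (h | ⟨h1, h2⟩)
          · left; exact h
          · exact Or.inr ⟨h1, List.mem_cons_of_mem _ h2⟩
        · rintro (h | ⟨h1, h2⟩)
          · left; exact h
          · rcases List.mem_cons.mp h2 with h2 | h2
            · subst h2; exact absurd h1 hq
            · right; exact ⟨h1, h2⟩

-- the flattened list of windows B slices out of one line
def ghbSubs (lengths : List Int) (line : String) : List String :=
  (PySem.List.pyRange 0 (PySem.Str.len line + 1) 1).flatMap
    (fun i => (lengths.filter (fun L => !decide (PySem.Str.len line < i + L))).map
      (fun L => PySem.Str.slice line (some i) (some (i + L))))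

theorem ghb_mem_lengths (queries : List String) (L : Int) :
    L ∈ PySem.List.sorted (PySem.Set.ofList (queries.map (fun q => PySem.Str.len q)))
        (fun L => L) ↔ ∃ q ∈ queries, L = PySem.Str.len q := by
  rw [(PySem.List.sorted_perm _ _ _).mem_iff, PySem.Set.mem_ofList, List.mem_map]
  constructor
  · rintro ⟨q, hq, h⟩; exact ⟨q, hq, h.symm⟩
  · rintro ⟨q, hq, h⟩; exact ⟨q, hq, h.symm⟩

theorem ghb_mem_subs (queries : List String) (line k : String) (hkq : k ∈ queries) :
    k ∈ ghbSubs (PySem.List.sorted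
        (PySem.Set.ofList (queries.map (fun q => PySem.Str.len q))) (fun L => L)) line ↔
      PySem.Str.isIn k line = true := by
  unfold ghbSubs
  rw [List.mem_flatMap]
  constructor
  · rintro ⟨i, hi, hk⟩
    rw [List.mem_map] at hk
    obtain ⟨L, hL, hslice⟩ := hk
    rw [List.mem_filter] at hL
    obtain ⟨hLmem, hLle⟩ := hL
    rw [ghb_mem_lengths] at hLmem
    obtain ⟨q, _, hLq⟩ := hLmem
    have h0i : 0 ≤ i := by
      rw [PySem.List.mem_pyRange_iff_of_pos (by norm_num)] at hi
      exact hi.1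
    have h0L : 0 ≤ L := by rw [hLq, PySem.Str.len_eq]; exact Int.natCast_nonneg _
    rw [PySem.Str.isIn_iff_infix, ← hslice, PySem.Str.toList_slice,
      PySem.Chars.slice_eq_listSlice, PySem.List.slice_toNat _ h0i (by omega)]
    exact ((List.take_prefix _ _).isInfix).trans ((List.drop_suffix _ _).isInfix)
  · intro hin
    rw [PySem.Str.isIn_iff_infix] at hin
    obtain ⟨p, s, hps⟩ := hin
    have hlen : p.length + k.toList.length ≤ line.toList.length := by
      have := congrArg List.length hps
      rw [List.length_append, List.length_append] at this
      omega
    refine ⟨(p.length : Int), ?_, ?_⟩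
    · rw [PySem.List.mem_pyRange_iff_of_pos (by norm_num)]
      refine ⟨Int.natCast_nonneg _, ?_, one_dvd _⟩
      rw [PySem.Str.len_eq]
      omega
    · rw [List.mem_map]
      refine ⟨(k.toList.length : Int), ?_, ?_⟩
      · rw [List.mem_filter, ghb_mem_lengths]
        refine ⟨⟨k, hkq, by rw [PySem.Str.len_eq]⟩, ?_⟩
        rw [PySem.Str.len_eq]
        simp only [Bool.not_eq_eq_eq_not, Bool.not_true, decide_eq_false_iff_not, not_lt]
        exact_mod_cast hlen
      · rw [← String.toList_inj, PySem.Str.toList_slice, PySem.Chars.slice_eq_listSlice,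
          PySem.List.slice_toNat _ (Int.natCast_nonneg _) (by omega)]
        have h1 : ((p.length : Int) + (k.toList.length : Int)).toNat
            = p.length + k.toList.length := by omega
        have h2 : ((p.length : Int)).toNat = p.length := by omega
        rw [h1, h2]
        have h3 : p.length + k.toList.length - p.length = k.toList.length := by omega
        rw [h3, ← hps, List.append_assoc, List.drop_left, List.take_left]

theorem ghb_line_spec (queries : List String) (line : String)
    (d : PySem.Dict String (List String))
    (hkeys : d.keys = PySem.List.dedup queries) :
    (ghbLine (PySem.Set.ofList queries)
        (PySem.List.sorted (PySem.Set.ofList (queries.map (fun q => PySem.Str.len q)))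
          (fun L => L)) d line).keys = d.keys ∧
    (∀ k, (ghbLine (PySem.Set.ofList queries)
        (PySem.List.sorted (PySem.Set.ofList (queries.map (fun q => PySem.Str.len q)))
          (fun L => L)) d line).getD k [] =
      if k ∈ queries ∧ PySem.Str.isIn k line = true
      then d.getD k [] ++ [line] else d.getD k []) := by
  set lengths := PySem.List.sorted
    (PySem.Set.ofList (queries.map (fun q => PySem.Str.len q))) (fun L => L) with hlengths
  have hpair : lengths.Pairwise (· ≤ ·) :=
    PySem.List.sorted_pairwise _ (fun L => L)
  have hk : ∀ q ∈ queries, d.contains q = true := by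
    intro q hq
    rw [PySem.Dict.contains_iff_mem_keys, hkeys, PySem.List.mem_dedup]
    exact hq
  unfold ghbLine
  have heq : (fun (st : PySem.Dict String (List String) × PySem.Set String) (i : Int) =>
      ghbLens line (PySem.Set.ofList queries) (PySem.Str.len line) i lengths st)
      = fun st i => ((lengths.filter (fun L => !decide (PySem.Str.len line < i + L))).map
          (fun L => PySem.Str.slice line (some i) (some (i + L)))).foldl
          (ghbStep line (PySem.Set.ofList queries)) st := by
    funext st i
    exact ghb_lens_eq line _ _ i lengths st hpair
  simp only [heq]
  rw [ghb_foldl_flatMap]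
  obtain ⟨k1, k2, k3⟩ := ghb_fold queries line _ d PySem.Set.empty hk
  refine ⟨k1, fun k => ?_⟩
  rw [k2 k]
  by_cases hq : k ∈ queries
  · have hmemsubs := ghb_mem_subs queries line k hq
    unfold ghbSubs at hmemsubs
    by_cases hin : PySem.Str.isIn k line = true
    · rw [if_pos ⟨hq, by simp [PySem.Set.empty], hmemsubs.mpr hin⟩, if_pos ⟨hq, hin⟩]
    · rw [if_neg (fun h => hin (hmemsubs.mp h.2.2)), if_neg (fun h => hin h.2)]
  · rw [if_neg (fun h => hq h.1), if_neg (fun h => hq h.1)]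

theorem ghb_outer (queries : List String) (ls done : List String)
    (d : PySem.Dict String (List String))
    (hkeys : d.keys = PySem.List.dedup queries)
    (hval : ∀ k, d.getD k [] =
      if k ∈ queries then done.filter (fun l => PySem.Str.isIn k l) else []) :
    (ls.foldl (ghbLine (PySem.Set.ofList queries)
        (PySem.List.sorted (PySem.Set.ofList (queries.map (fun q => PySem.Str.len q)))
          (fun L => L))) d).keys = PySem.List.dedup queries ∧
    (∀ k, (ls.foldl (ghbLine (PySem.Set.ofList queries)
        (PySem.List.sorted (PySem.Set.ofList (queries.map (fun q => PySem.Str.len q)))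
          (fun L => L))) d).getD k [] =
      if k ∈ queries then (done ++ ls).filter (fun l => PySem.Str.isIn k l) else []) := by
  induction ls generalizing done d with
  | nil => exact ⟨hkeys, by simpa using hval⟩
  | cons line ls ih =>
    simp only [List.foldl_cons]
    obtain ⟨k1, k2⟩ := ghb_line_spec queries line d hkeys
    have hval' : ∀ k, (ghbLine (PySem.Set.ofList queries)
        (PySem.List.sorted (PySem.Set.ofList (queries.map (fun q => PySem.Str.len q)))
          (fun L => L)) d line).getD k [] =
        if k ∈ queries then (done ++ [line]).filter (fun l => PySem.Str.isIn k l) else [] := by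
      intro k
      rw [k2 k, hval k]
      by_cases hq : k ∈ queries
      · simp only [if_pos hq]
        rw [List.filter_append, List.filter_cons, List.filter_nil]
        by_cases hin : PySem.Str.isIn k line = true
        · rw [if_pos ⟨hq, hin⟩, if_pos hin]
        · rw [if_neg (fun h => hin h.2), if_neg hin, List.append_nil]
      · simp only [if_neg hq]
        rw [if_neg (fun h => hq h.1)]
    obtain ⟨r1, r2⟩ := ih (done ++ [line]) _ (k1.trans hkeys) hval'
    refine ⟨r1, fun k => ?_⟩
    rw [r2 k, List.append_assoc, List.singleton_append]

theorem gh_b_main (lines queries : List String) :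
    group_hits_py_alt lines queries = ghCanon lines queries := by
  unfold group_hits_py_alt ghCanon
  set d0 : PySem.Dict String (List String) :=
    queries.foldl (fun d q => d.insert q []) PySem.Dict.empty with hd0
  have hkeys0 : d0.keys = PySem.List.dedup queries := by
    rw [hd0, PySem.Dict.keys_foldl_insert queries (fun _ _ => []) PySem.Dict.empty]
    rw [PySem.List.dedup_eq_ofList, PySem.Set.ofList_eq_foldl]
    rfl
  have hval0 : ∀ k, d0.getD k [] =
      if k ∈ queries then List.filter (fun l => PySem.Str.isIn k l) [] else [] := by
    intro k
    rw [gh_init_getD queries PySem.Dict.empty (fun k => PySem.Dict.getD_empty k []) k]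
    simp
  obtain ⟨r1, r2⟩ := ghb_outer queries (PySem.List.dedup lines) [] d0 hkeys0 hval0
  rw [PySem.Dict.items_eq_map_keys _ (r1 ▸ PySem.List.nodup_dedup queries) []]
  rw [r1]
  refine List.map_congr_left (fun k hk => ?_)
  rw [r2 k, if_pos ((PySem.List.mem_dedup queries k).mp hk)]
  simp

-- ===== VERDICT (by name: the statement is the Claim_ definition above) =====
theorem group_hits_py_spec : Claim_equal_group_hits_py := by
  intro lines queries _
  unfold Spec_group_hits_py
  rw [gh_a_main, gh_b_main]
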